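-- pv_equiv track=rewrite | github.com/hari2095/Natural_Language_Processing | NLP/Naive_Bayes_classifier/naivebayes.py | get_term_counts_per_class
-- ===== SOURCE A (Python) =====
-- from collections import Counter
--
-- def get_term_counts_per_class(Y,tokens):
--     #Get count for each term occuring in each of the speeches
--     term_counts = Counter(element for speech in tokens for element in speech)
--
--     counts_dict = {}
--     #iterate over each of the speeches
--     for i in range(len(Y)):
--         speech = Y[i]
--         terms = Counter(tokens[i])
--         if speech in counts_dict.keys():
--             curr_terms = counts_dict[speech]
--             curr_terms += terms
--             counts_dict[speech] = curr_terms
--         else: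
--             counts_dict[speech] = terms
--     #print (counts_dict['RED']['THE'])
--     #print (sum(counts_dict['RED'].values()))
--     return counts_dict
-- ===== SOURCE B (Python) =====
-- from collections import Counter
--
-- def get_term_counts_per_class(Y, tokens):
--     # group-first: pool all tokens of each label, then count each pool once
--     pooled = {}
--     for label, toks in zip(Y, tokens):
--         pooled.setdefault(label, []).extend(toks)
--     return {label: Counter(pool) for label, pool in pooled.items()}
-- ===== Notes on version B (the rewrite author's own statement) =====
-- stated objective: alternative
-- what changed: A indexes Y and tokens by position, builds a Counter per speech and merges it into the running per-class Counter (count-each-then-merge); B iterates zip(Y, tokens), pools plain token lists per label and counts each pooled list in one final pass (group-first-then-count). Pre_ excludes inputs where len(tokens) < len(Y), on which A raises IndexError.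
import Mathlib
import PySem

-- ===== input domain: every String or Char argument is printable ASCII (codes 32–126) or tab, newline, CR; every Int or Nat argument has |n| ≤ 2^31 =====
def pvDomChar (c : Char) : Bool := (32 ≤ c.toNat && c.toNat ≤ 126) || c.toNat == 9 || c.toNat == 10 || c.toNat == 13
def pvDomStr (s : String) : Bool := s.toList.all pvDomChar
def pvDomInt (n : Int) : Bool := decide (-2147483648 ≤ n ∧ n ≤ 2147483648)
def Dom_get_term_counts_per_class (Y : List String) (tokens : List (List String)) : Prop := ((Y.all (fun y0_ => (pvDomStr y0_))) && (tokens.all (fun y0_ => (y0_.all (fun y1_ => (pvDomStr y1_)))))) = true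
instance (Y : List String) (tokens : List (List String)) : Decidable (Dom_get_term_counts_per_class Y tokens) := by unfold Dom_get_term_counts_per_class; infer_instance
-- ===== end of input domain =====

-- B changes the decomposition: A walks indices, counts each speech and merges Counters per class;
-- B walks zip(Y, tokens), pools the token lists per class and counts each pool once at the end.

-- ===== PORT A =====
-- one step of Counter.__iadd__: self[k] = self.get(k, 0) + v  (all counts here are positive, so
-- its trailing _keep_positive removes nothing)
def pvAddPair (d : PySem.Dict String Int) (p : String × Int) : PySem.Dict String Int :=
  d.insert p.1 (d.getD p.1 0 + p.2)

-- curr_terms += terms  on Counters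
def pvCounterMerge (curr terms : PySem.Dict String Int) : PySem.Dict String Int :=
  terms.items.foldl pvAddPair curr

-- the body of A's for-loop over i in range(len(Y))
def pvStepA (Y : List String) (tokens : List (List String))
    (d : PySem.Dict String (PySem.Dict String Int)) (i : Int) :
    PySem.Dict String (PySem.Dict String Int) :=
  let speech := PySem.List.pyGetD Y i ""                            -- Y[i]; i is in range
  let terms := PySem.Dict.counter (PySem.List.pyGetD tokens i [])   -- Counter(tokens[i]); in range by Pre_
  if d.contains speech then
    d.insert speech (pvCounterMerge (d.getD speech PySem.Dict.empty) terms)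
  else
    d.insert speech terms

def get_term_counts_per_class (Y : List String) (tokens : List (List String)) : List (String × List (String × Int)) :=
  -- dead line of A: term_counts = Counter(element for speech in tokens for element in speech)
  let _term_counts := PySem.Dict.counter (tokens.flatMap (fun speech => speech))
  let counts_dict := (PySem.List.pyRange 0 (Y.length : Int) 1).foldl (pvStepA Y tokens) PySem.Dict.empty
  counts_dict.items.map (fun p => (p.1, p.2.items))

-- ===== PORT B =====
-- pooled.setdefault(label, []).extend(toks)  ≡  pooled[label] = pooled.get(label, []) + toks
def pvStepB (d : PySem.Dict String (List String)) (p : String × List String) :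
    PySem.Dict String (List String) :=
  d.modify p.1 [] (· ++ p.2)

def get_term_counts_per_class_alt (Y : List String) (tokens : List (List String)) : List (String × List (String × Int)) :=
  let pooled := (Y.zip tokens).foldl pvStepB PySem.Dict.empty
  pooled.items.map (fun p => (p.1, (PySem.Dict.counter p.2).items))

-- ===== PRECONDITION & SPEC =====
-- Pre_ excludes exactly the inputs where the Python A raises IndexError (tokens[i] with
-- len(tokens) < len(Y)).
def Pre_get_term_counts_per_class (Y : List String) (tokens : List (List String)) : Prop :=
  Y.length ≤ tokens.length
instance (Y : List String) (tokens : List (List String)) : Decidable (Pre_get_term_counts_per_class Y tokens) := by unfold Pre_get_term_counts_per_class; infer_instance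

def pvWitness_get_term_counts_per_class : List String × List (List String) :=
  (["RED", "BLUE", "RED"], [["THE", "CAT", "THE"], ["DOG"], ["THE", "SAT"]])

def Spec_get_term_counts_per_class (Y : List String) (tokens : List (List String)) (out : List (String × List (String × Int))) : Prop := out = get_term_counts_per_class_alt Y tokens
instance (Y : List String) (tokens : List (List String)) (out : List (String × List (String × Int))) : Decidable (Spec_get_term_counts_per_class Y tokens out) := by unfold Spec_get_term_counts_per_class; infer_instance

-- ===== CLAIM (what is proved, stated in full; the proofs are below) =====
def Claim_equal_get_term_counts_per_class : Prop := ∀ (Y : List String) (tokens : List (List String)), Dom_get_term_counts_per_class Y tokens → Pre_get_term_counts_per_class Y tokens → Spec_get_term_counts_per_class Y tokens (get_term_counts_per_class Y tokens)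


-- ===== LEMMAS AND PROOFS =====

-- Counter's increment step (PySem.Dict.counter xs = xs.foldl pvCounterAdd1 empty, by
-- PySem.Dict.counter_eq_foldl)
def pvCounterAdd1 (d : PySem.Dict String Int) (t : String) : PySem.Dict String Int :=
  d.modify t 0 (· + 1)

-- A's loop body as a function of the (label, speech) pair it actually uses
def pvStepP (d : PySem.Dict String (PySem.Dict String Int)) (s : String) (ts : List String) :
    PySem.Dict String (PySem.Dict String Int) :=
  if d.contains s then
    d.insert s (pvCounterMerge (d.getD s PySem.Dict.empty) (PySem.Dict.counter ts))
  else
    d.insert s (PySem.Dict.counter ts)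

-- map Counter over the values of a dict of token lists
def pvMapVal (d : PySem.Dict String (List String)) : PySem.Dict String (PySem.Dict String Int) :=
  ⟨d.items.map (fun p => (p.1, PySem.Dict.counter p.2))⟩

theorem pvMapIfEq {ν : Type} (l : List (String × ν)) (t : String) (w : String × ν)
    (h : ∀ p ∈ l, p.1 ≠ t) :
    l.map (fun p => if (p.1 == t) = true then w else p) = l := by
  have : l.map (fun p => if (p.1 == t) = true then w else p) = l.map id :=
    List.map_congr_left (fun p hp => by simp [h p hp])
  simpa using this

theorem contains_mapVal (d : PySem.Dict String (List String)) (k : String) :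
    (pvMapVal d).contains k = d.contains k := by
  simp [pvMapVal, PySem.Dict.contains, List.any_map, Function.comp_def]

theorem get?_mapVal (d : PySem.Dict String (List String)) (k : String) :
    (pvMapVal d).get? k = (d.get? k).map PySem.Dict.counter := by
  simp only [pvMapVal, PySem.Dict.get?]
  induction d.items with
  | nil => rfl
  | cons p l ih =>
    by_cases h : p.1 = k
    · simp [h]
    · simpa [List.find?_cons, h] using ih

theorem insert_mapVal (d : PySem.Dict String (List String)) (k : String) (v : List String) :
    pvMapVal (d.insert k v) = (pvMapVal d).insert k (PySem.Dict.counter v) := by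
  by_cases h : d.contains k
  · have h' : (pvMapVal d).contains k = true := by rw [contains_mapVal]; exact h
    apply PySem.Dict.ext
    show ((d.insert k v).items.map (fun p => (p.1, PySem.Dict.counter p.2))) = _
    rw [PySem.Dict.items_insert_of_contains d v h, PySem.Dict.items_insert_of_contains _ _ h']
    show _ = List.map _ (d.items.map (fun p => (p.1, PySem.Dict.counter p.2)))
    simp only [List.map_map]
    apply List.map_congr_left
    intro p _
    by_cases hp : p.1 = k <;> simp [hp]
  · have h0 : d.contains k = false := by simpa using h
    have h' : (pvMapVal d).contains k = false := by rw [contains_mapVal]; exact h0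
    apply PySem.Dict.ext
    show ((d.insert k v).items.map (fun p => (p.1, PySem.Dict.counter p.2))) = _
    rw [PySem.Dict.items_insert_of_not_contains d v h0,
      PySem.Dict.items_insert_of_not_contains _ _ h']
    simp [pvMapVal]

-- commuting two inserts at distinct keys when the first key is already present
theorem insert_insert_comm_of_contains (c : PySem.Dict String Int) (t k : String) (a b : Int)
    (hc : c.contains t = true) (hne : k ≠ t) :
    (c.insert t a).insert k b = (c.insert k b).insert t a := by
  have h2 : (c.insert k b).contains t = true := by
    rw [PySem.Dict.contains_insert]; simp [hc]
  by_cases hk : c.contains k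
  · have h1 : (c.insert t a).contains k = true := by
      rw [PySem.Dict.contains_insert]; simp [hk]
    apply PySem.Dict.ext
    rw [PySem.Dict.items_insert_of_contains _ b h1, PySem.Dict.items_insert_of_contains c a hc,
      PySem.Dict.items_insert_of_contains _ a h2, PySem.Dict.items_insert_of_contains c b hk]
    simp only [List.map_map]
    apply List.map_congr_left
    intro p _
    by_cases hp : p.1 = t <;> by_cases hq : p.1 = k <;>
      simp_all [Ne.symm hne]
  · have hk0 : c.contains k = false := by simpa using hk
    have h1 : (c.insert t a).contains k = false := by
      rw [PySem.Dict.contains_insert]; simp [hk0, hne]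
    apply PySem.Dict.ext
    rw [PySem.Dict.items_insert_of_not_contains _ b h1, PySem.Dict.items_insert_of_contains c a hc,
      PySem.Dict.items_insert_of_contains _ a h2,
      PySem.Dict.items_insert_of_not_contains c b hk0]
    rw [List.map_append]
    simp only [List.map_cons, List.map_nil]
    simp [hne]

-- pushing one increment through a fold of pvAddPair whose keys avoid t
theorem foldl_addPair_add1_comm (l : List (String × Int)) (c : PySem.Dict String Int) (t : String)
    (hc : c.contains t = true) (hl : ∀ p ∈ l, p.1 ≠ t) :
    l.foldl pvAddPair (c.insert t (c.getD t 0 + 1)) =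
      (l.foldl pvAddPair c).insert t ((l.foldl pvAddPair c).getD t 0 + 1) := by
  induction l generalizing c with
  | nil => rfl
  | cons p l ih =>
    have hpt : p.1 ≠ t := hl p (by simp)
    have h1 : pvAddPair (c.insert t (c.getD t 0 + 1)) p =
        (pvAddPair c p).insert t ((pvAddPair c p).getD t 0 + 1) := by
      simp only [pvAddPair]
      rw [PySem.Dict.getD_insert_of_ne c _ _ hpt, PySem.Dict.getD_insert_of_ne c _ _ (Ne.symm hpt)]
      exact insert_insert_comm_of_contains c t p.1 _ _ hc hpt
    rw [List.foldl_cons, h1, List.foldl_cons]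
    exact ih (pvAddPair c p)
      (by simp [pvAddPair, PySem.Dict.contains_insert, hc])
      (fun q hq => hl q (List.mem_cons_of_mem p hq))

-- absorbing a counter that got one more t = absorbing the counter, then one more t
theorem foldl_addPair_counterAdd1 (d : PySem.Dict String Int) (hd : d.keys.Nodup)
    (c : PySem.Dict String Int) (t : String) :
    (pvCounterAdd1 d t).items.foldl pvAddPair c = pvCounterAdd1 (d.items.foldl pvAddPair c) t := by
  by_cases h : d.contains t
  · obtain ⟨v, hv⟩ : ∃ v, d.get? t = some v := by
      cases hq : d.get? t with
      | none => rw [PySem.Dict.get?_eq_none_iff_contains] at hq; simp [h] at hq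
      | some v => exact ⟨v, rfl⟩
    have hgetD : d.getD t 0 = v := PySem.Dict.getD_of_get?_eq_some d 0 hv
    obtain ⟨l1, l2, hsplit⟩ := List.append_of_mem (PySem.Dict.mem_items_of_get?_eq_some d hv)
    have hnd := hd
    rw [PySem.Dict.keys, hsplit] at hnd
    simp only [List.map_append, List.map_cons, List.nodup_append, List.nodup_cons,
      List.mem_map] at hnd
    have hl1 : ∀ p ∈ l1, p.1 ≠ t := by
      intro p hp hpt
      exact hnd.2.2 t ⟨p, hp, hpt⟩ t (by simp) rfl
    have hl2 : ∀ p ∈ l2, p.1 ≠ t := by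
      intro p hp hpt
      exact hnd.2.1.1 ⟨p, hp, hpt⟩
    have hitems : (pvCounterAdd1 d t).items = l1 ++ (t, v + 1) :: l2 := by
      show (d.insert t (d.getD t 0 + 1)).items = _
      rw [PySem.Dict.items_insert_of_contains d _ h, hsplit, hgetD]
      rw [List.map_append, List.map_cons]
      rw [pvMapIfEq l1 t _ hl1, pvMapIfEq l2 t _ hl2]
      simp
    rw [hitems, hsplit, List.foldl_append, List.foldl_append, List.foldl_cons, List.foldl_cons]
    have hseed : pvAddPair (l1.foldl pvAddPair c) (t, v + 1) =
        (pvAddPair (l1.foldl pvAddPair c) (t, v)).insert t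
          ((pvAddPair (l1.foldl pvAddPair c) (t, v)).getD t 0 + 1) := by
      simp only [pvAddPair]
      rw [PySem.Dict.insert_insert_self, PySem.Dict.getD_insert_self]
      ring_nf
    rw [hseed,
      foldl_addPair_add1_comm l2 (pvAddPair (l1.foldl pvAddPair c) (t, v)) t
        (by simp [pvAddPair, PySem.Dict.contains_insert_self]) hl2]
    rfl
  · have h0 : d.contains t = false := by simpa using h
    have hitems : (pvCounterAdd1 d t).items = d.items ++ [(t, 1)] := by
      show (d.insert t (d.getD t 0 + 1)).items = _
      rw [PySem.Dict.getD_of_not_contains d 0 h0, PySem.Dict.items_insert_of_not_contains d _ h0]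
      norm_num
    rw [hitems, List.foldl_append]
    rfl

-- batch-merging a counter built on top of d = replaying its elements one at a time
theorem foldl_addPair_counter (ts : List String) (d : PySem.Dict String Int) (hd : d.keys.Nodup)
    (c : PySem.Dict String Int) :
    (ts.foldl pvCounterAdd1 d).items.foldl pvAddPair c =
      ts.foldl pvCounterAdd1 (d.items.foldl pvAddPair c) := by
  induction ts generalizing d c with
  | nil => rfl
  | cons t ts ih =>
    rw [List.foldl_cons,
      ih (pvCounterAdd1 d t) (PySem.Dict.nodup_keys_insert d t _ hd) c,
      foldl_addPair_counterAdd1 d hd c t, List.foldl_cons]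

-- Counter merge = Counter of the concatenation
theorem counterMerge_counter (xs ts : List String) :
    pvCounterMerge (PySem.Dict.counter xs) (PySem.Dict.counter ts) = PySem.Dict.counter (xs ++ ts) := by
  show (ts.foldl pvCounterAdd1 PySem.Dict.empty).items.foldl pvAddPair (PySem.Dict.counter xs) = _
  rw [foldl_addPair_counter ts PySem.Dict.empty PySem.Dict.nodup_keys_empty (PySem.Dict.counter xs)]
  show ts.foldl pvCounterAdd1 (xs.foldl pvCounterAdd1 PySem.Dict.empty) = PySem.Dict.counter (xs ++ ts)
  rw [← List.foldl_append]
  rfl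

-- one loop step of A, seen through pvMapVal, is one loop step of B
theorem mapVal_step (dB : PySem.Dict String (List String)) (s : String) (ts : List String) :
    pvStepP (pvMapVal dB) s ts = pvMapVal (dB.insert s (dB.getD s [] ++ ts)) := by
  unfold pvStepP
  rw [insert_mapVal, contains_mapVal]
  by_cases h : dB.contains s
  · obtain ⟨xs, hxs⟩ : ∃ xs, dB.get? s = some xs := by
      cases hq : dB.get? s with
      | none => rw [PySem.Dict.get?_eq_none_iff_contains] at hq; simp [h] at hq
      | some xs => exact ⟨xs, rfl⟩
    have h1 : dB.getD s [] = xs := PySem.Dict.getD_of_get?_eq_some dB [] hxs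
    have h2 : (pvMapVal dB).getD s PySem.Dict.empty = PySem.Dict.counter xs := by
      rw [PySem.Dict.getD_eq_get?_getD, get?_mapVal, hxs]; rfl
    simp [h, h1, h2, counterMerge_counter]
  · have h0 : dB.contains s = false := by simpa using h
    rw [PySem.Dict.getD_of_not_contains dB [] h0]
    simp [h0]

-- the whole loop over a list of (label, speech) pairs, seen through pvMapVal, is B's loop
theorem foldl_inv (l : List (String × List String)) :
    ∀ dB : PySem.Dict String (List String),
      l.foldl (fun d p => pvStepP d p.1 p.2) (pvMapVal dB) = pvMapVal (l.foldl pvStepB dB) := by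
  induction l with
  | nil => intro dB; rfl
  | cons p l ih =>
    intro dB
    rw [List.foldl_cons, List.foldl_cons]
    have hstep : pvStepP (pvMapVal dB) p.1 p.2 = pvMapVal (pvStepB dB p) := by
      rw [mapVal_step]; rfl
    rw [hstep]
    exact ih _

-- A's index loop over range(n) is the pair loop over the first n zipped pairs
theorem foldl_range_eq_zip (Y : List String) (tokens : List (List String))
    (h : Y.length ≤ tokens.length) (n : Nat) (hn : n ≤ Y.length)
    (d : PySem.Dict String (PySem.Dict String Int)) :
    (PySem.List.pyRange 0 (n : Int) 1).foldl (pvStepA Y tokens) d =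
      ((Y.zip tokens).take n).foldl (fun d p => pvStepP d p.1 p.2) d := by
  induction n with
  | zero => rfl
  | succ m ih =>
    have hm : m ≤ Y.length := Nat.le_of_succ_le hn
    have hmY : m < Y.length := hn
    have hmT : m < tokens.length := lt_of_lt_of_le hmY h
    have hcast : ((m + 1 : Nat) : Int) = (m : Int) + 1 := by push_cast; ring
    rw [hcast, PySem.List.pyRange_one_succ_right (by positivity), List.foldl_append]
    have hzlen : m < (Y.zip tokens).length := by
      rw [List.length_zip]; omega
    have htake : (Y.zip tokens).take (m + 1) =
        (Y.zip tokens).take m ++ [(Y[m], tokens[m])] := by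
      rw [List.take_add_one]
      simp [List.getElem?_eq_getElem hzlen, List.getElem_zip]
    rw [htake, List.foldl_append, ih hm]
    have hstep : pvStepA Y tokens (((Y.zip tokens).take m).foldl (fun d p => pvStepP d p.1 p.2) d)
        (m : Int) = pvStepP (((Y.zip tokens).take m).foldl (fun d p => pvStepP d p.1 p.2) d)
          Y[m] tokens[m] := by
      unfold pvStepA
      rw [PySem.List.pyGetD_eq_getElem Y _ (by positivity) (by exact_mod_cast hmY),
        PySem.List.pyGetD_eq_getElem tokens _ (by positivity) (by exact_mod_cast hmT)]
      rfl
    simp [hstep]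

theorem pvWitness_ok : Dom_get_term_counts_per_class pvWitness_get_term_counts_per_class.1 pvWitness_get_term_counts_per_class.2 ∧ Pre_get_term_counts_per_class pvWitness_get_term_counts_per_class.1 pvWitness_get_term_counts_per_class.2 := by
  decide

-- ===== VERDICT (by name: the statement is the Claim_ definition above) =====
theorem get_term_counts_per_class_spec : Claim_equal_get_term_counts_per_class := by
  intro Y tokens _ hpre
  unfold Spec_get_term_counts_per_class
  simp only [get_term_counts_per_class, get_term_counts_per_class_alt]
  have hz : (Y.zip tokens).take Y.length = Y.zip tokens := by
    apply List.take_of_length_le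
    rw [List.length_zip]; omega
  have h0 : (PySem.Dict.empty : PySem.Dict String (PySem.Dict String Int)) = pvMapVal PySem.Dict.empty := rfl
  rw [foldl_range_eq_zip Y tokens hpre Y.length le_rfl, hz, h0,
    foldl_inv (Y.zip tokens) PySem.Dict.empty]
  simp [pvMapVal, List.map_map, Function.comp_def]
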